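-- pv_equiv track=rewrite | github.com/notfresh/python_learn | pandas_learn/load_data.py | single_find
-- ===== SOURCE A (Python) =====
-- def single_find(ls, value):
--     res = []
--     length = len(ls)
--     for i in range(length-1):
--         if ls[i] < value and ls[i + 1] >= value:
--             res.append(i)
--             continue
--         if ls[i] >= value and ls[i + 1] < value:
--             res.append(i)
--             continue
--     return res
-- ===== SOURCE B (Python) =====
-- def single_find(ls, value):
--     # Stage 1: run-length encode the classification (x < value) into run lengths.
--     lengths = []
--     cur_b = None
--     cur_n = 0
--     for x in ls:
--         b = x < value
--         if cur_b == b: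
--             cur_n += 1
--         else:
--             if cur_n:
--                 lengths.append(cur_n)
--             cur_b = b
--             cur_n = 1
--     if cur_n:
--         lengths.append(cur_n)
--     # Stage 2: each run except the last ends at a crossing; emit its end index.
--     res = []
--     pos = 0
--     for n in lengths[:-1]:
--         pos += n
--         res.append(pos - 1)
--     return res
-- ===== Notes on version B (the rewrite author's own statement) =====
-- stated objective: alternative
-- what changed: Replaces A's single loop over adjacent index pairs with a run-length encoding of the below/at-or-above classification followed by a prefix-sum pass over the run lengths, emitting the end index of each run but the last; no adjacent-pair comparison is ever made.
import Mathlib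
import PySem

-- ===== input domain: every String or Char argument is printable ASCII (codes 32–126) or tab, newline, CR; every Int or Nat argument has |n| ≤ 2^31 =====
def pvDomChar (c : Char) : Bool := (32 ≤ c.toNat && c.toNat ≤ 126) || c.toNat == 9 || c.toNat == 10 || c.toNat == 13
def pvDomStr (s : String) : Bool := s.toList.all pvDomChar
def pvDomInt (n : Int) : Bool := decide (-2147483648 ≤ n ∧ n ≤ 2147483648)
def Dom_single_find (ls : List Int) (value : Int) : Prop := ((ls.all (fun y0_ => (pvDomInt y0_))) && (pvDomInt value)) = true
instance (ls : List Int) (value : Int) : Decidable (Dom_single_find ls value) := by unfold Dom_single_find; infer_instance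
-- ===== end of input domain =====

-- B replaces A's adjacent-pair scan by run-length encoding of the below/at-or-above
-- classification plus a prefix-sum pass over the run lengths (alternative algorithm,
-- same O(n) cost).

-- ===== PORT A =====
-- A: loop i over range(len(ls)-1), appending i when the adjacent pair crosses value.
def single_find (ls : List Int) (value : Int) : List Int :=
  (List.range (ls.length - 1)).foldl
    (fun res i =>
      if ls.getD i 0 < value ∧ ls.getD (i + 1) 0 ≥ value then res ++ [(i : Int)]
      else if ls.getD i 0 ≥ value ∧ ls.getD (i + 1) 0 < value then res ++ [(i : Int)]
      else res) []

-- ===== PORT B =====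
-- B stage 1: run-length encode the classification (x < value) into run lengths
-- (state: lengths so far, current class cur_b, current run length cur_n);
-- B stage 2: each run except the last ends at a crossing; emit its end index
-- (state: result so far, running position pos).
def single_find_alt (ls : List Int) (value : Int) : List Int :=
  let st := ls.foldl
    (fun (st : List Nat × Option Bool × Nat) x =>
      let b := decide (x < value)
      if st.2.1 == some b then (st.1, st.2.1, st.2.2 + 1)
      else ((if st.2.2 ≠ 0 then st.1 ++ [st.2.2] else st.1), some b, 1))
    ([], none, 0)
  let lengths := if st.2.2 ≠ 0 then st.1 ++ [st.2.2] else st.1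
  (lengths.dropLast.foldl
    (fun (rp : List Int × Int) (n : Nat) => (rp.1 ++ [rp.2 + (n : Int) - 1], rp.2 + (n : Int)))
    ([], 0)).1

-- ===== PRECONDITION & SPEC =====
def Spec_single_find (ls : List Int) (value : Int) (out : List Int) : Prop := out = single_find_alt ls value
instance (ls : List Int) (value : Int) (out : List Int) : Decidable (Spec_single_find ls value out) := by unfold Spec_single_find; infer_instance

-- ===== CLAIM (what is proved, stated in full; the proofs are below) =====
def Claim_equal_single_find : Prop := ∀ (ls : List Int) (value : Int), Dom_single_find ls value → Spec_single_find ls value (single_find ls value)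

-- ===== LEMMAS AND PROOFS =====

-- run-length encoding of a Bool list, current run of class b with length k
def pvRle (b : Bool) (k : Nat) : List Bool → List Nat
  | [] => [k]
  | c :: t => if c = b then pvRle b (k + 1) t else k :: pvRle c 1 t

-- end indices of the runs, starting at position pos
def pvEnds (pos : Int) : List Nat → List Int
  | [] => []
  | n :: t => (pos + (n : Int) - 1) :: pvEnds (pos + (n : Int)) t

-- B's value, expressed on the classification list
def pvG : List Bool → List Int
  | [] => []
  | c :: t => pvEnds 0 ((pvRle c 1 t).dropLast)

-- A's value, expressed on the classification list
def pvF (bs : List Bool) : List Int :=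
  (List.range (bs.length - 1)).filterMap
    (fun i => if bs.getD i false ≠ bs.getD (i + 1) false then some ((i : Nat) : Int) else none)

-- B's stage-1 step, on the classification bit
def pvStep (st : List Nat × Option Bool × Nat) (b : Bool) : List Nat × Option Bool × Nat :=
  if st.2.1 == some b then (st.1, st.2.1, st.2.2 + 1)
  else ((if st.2.2 ≠ 0 then st.1 ++ [st.2.2] else st.1), some b, 1)

theorem pv_foldA (c1 c2 : Nat → Prop) [DecidablePred c1] [DecidablePred c2]
    (l : List Nat) (acc : List Int) :
    l.foldl
      (fun res i =>
        if c1 i then res ++ [(i : Int)]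
        else if c2 i then res ++ [(i : Int)]
        else res) acc
    = acc ++ l.filterMap (fun i => if c1 i ∨ c2 i then some ((i : Nat) : Int) else none) := by
  induction l generalizing acc with
  | nil => simp
  | cons a t ih =>
    by_cases h1 : c1 a <;> by_cases h2 : c2 a <;>
      simp [List.foldl, h1, h2, ih]

theorem pvEnds_add (ns : List Nat) (p q : Int) :
    pvEnds (p + q) ns = (pvEnds q ns).map (fun z => p + z) := by
  induction ns generalizing q with
  | nil => simp [pvEnds]
  | cons n t ih =>
    simp only [pvEnds, List.map_cons]
    refine congrArg₂ List.cons (by ring) ?_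
    rw [add_assoc]
    exact ih (q + (n : Int))

theorem pv_foldB2 (ns : List Nat) (res : List Int) (pos : Int) :
    (ns.foldl (fun (rp : List Int × Int) (n : Nat) => (rp.1 ++ [rp.2 + (n : Int) - 1], rp.2 + (n : Int)))
      (res, pos)).1 = res ++ pvEnds pos ns := by
  induction ns generalizing res pos with
  | nil => simp [pvEnds]
  | cons n t ih =>
    rw [List.foldl_cons, ih]
    simp [pvEnds]

theorem pvRle_ne_nil (t : List Bool) (b : Bool) (k : Nat) : pvRle b k t ≠ [] := by
  induction t generalizing b k with
  | nil => simp [pvRle]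
  | cons c t ih =>
    simp only [pvRle]
    split_ifs
    · exact ih _ _
    · simp

theorem pvRle_succ (t : List Bool) (b : Bool) (k : Nat) :
    pvRle b (k + 1) t = ((pvRle b k t).headD 0 + 1) :: (pvRle b k t).tail := by
  induction t generalizing b k with
  | nil => simp [pvRle]
  | cons c t ih =>
    simp only [pvRle]
    split_ifs
    · exact ih _ _
    · simp

theorem pv_fold1 (t : List Bool) (L : List Nat) (b : Bool) (k : Nat) (hk : k ≠ 0) :
    (if (t.foldl pvStep (L, some b, k)).2.2 ≠ 0
      then (t.foldl pvStep (L, some b, k)).1 ++ [(t.foldl pvStep (L, some b, k)).2.2]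
      else (t.foldl pvStep (L, some b, k)).1) = L ++ pvRle b k t := by
  induction t generalizing L b k with
  | nil => simp [pvRle, hk]
  | cons c t ih =>
    rw [List.foldl_cons]
    by_cases h : c = b
    · have hs : pvStep (L, some b, k) c = (L, some b, k + 1) := by
        simp [pvStep, h]
      rw [hs, ih L b (k + 1) (by omega)]
      simp [pvRle, h]
    · have hs : pvStep (L, some b, k) c = (L ++ [k], some c, 1) := by
        simp [pvStep, hk, show ¬b = c from fun e => h e.symm]
      rw [hs, ih (L ++ [k]) c 1 (by omega)]
      simp [pvRle, h]

-- recursion of A's form on the classification list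
theorem pvF_cons (a b : Bool) (t : List Bool) :
    pvF (a :: b :: t) = (if a = b then [] else [(0 : Int)]) ++ (pvF (b :: t)).map (fun z => z + 1) := by
  simp only [pvF, List.length_cons, Nat.add_sub_cancel]
  rw [List.range_succ_eq_map, List.filterMap_cons, List.filterMap_map]
  have h1 : ((fun i => if (a :: b :: t).getD i false ≠ (a :: b :: t).getD (i + 1) false
        then some ((i : Nat) : Int) else none) ∘ Nat.succ)
      = fun i => Option.map (fun z => z + 1)
          (if (b :: t).getD i false ≠ (b :: t).getD (i + 1) false
            then some ((i : Nat) : Int) else none) := by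
    funext i
    simp only [Function.comp_apply, Nat.succ_eq_add_one, List.getD_cons_succ]
    split_ifs with h
    · simp only [Option.map_some, Nat.cast_add, Nat.cast_one]
    · simp
  rw [h1, ← List.map_filterMap]
  by_cases hab : a = b
  · subst hab
    simp
  · simp [hab]

-- recursion of B's form on the classification list
theorem pvG_cons (a b : Bool) (t : List Bool) :
    pvG (a :: b :: t) = (if a = b then [] else [(0 : Int)]) ++ (pvG (b :: t)).map (fun z => z + 1) := by
  have hmap : ∀ (q : Int) (ns : List Nat), pvEnds (q + 1) ns = (pvEnds q ns).map (fun z => z + 1) := by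
    intro q ns
    rw [show q + 1 = 1 + q by ring, pvEnds_add]
    exact List.map_congr_left (fun z _ => by ring)
  simp only [pvG, pvRle]
  by_cases h : b = a
  · subst h
    rw [if_pos rfl, if_pos rfl, show (1 : Nat) + 1 = 1 + 1 from rfl, pvRle_succ]
    rcases hr : pvRle b 1 t with _ | ⟨n, r⟩
    · exact absurd hr (pvRle_ne_nil t b 1)
    · rcases r with _ | ⟨m, r'⟩
      · simp [pvEnds]
      · simp only [List.headD_cons, List.tail_cons, List.dropLast_cons₂, pvEnds,
          List.nil_append]
        refine congrArg₂ List.cons (by push_cast; ring) ?_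
        rw [show ((0 : Int) + ((n + 1 : Nat) : Int)) = (0 + (n : Int)) + 1 by push_cast; ring,
          hmap]
  · have hab : ¬ a = b := fun e => h e.symm
    rw [if_neg h, if_neg hab]
    rcases hr : pvRle b 1 t with _ | ⟨n, r⟩
    · exact absurd hr (pvRle_ne_nil t b 1)
    · simp only [List.dropLast_cons₂, pvEnds, List.cons_append, List.nil_append]
      refine congrArg₂ List.cons (by norm_num) ?_
      rw [show ((0 : Int) + ((1 : Nat) : Int)) = (0 : Int) + 1 by norm_num, hmap]

theorem pvFG (bs : List Bool) : pvF bs = pvG bs := by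
  induction bs with
  | nil => rfl
  | cons a t ih =>
    cases t with
    | nil => rfl
    | cons b t' =>
      rw [pvF_cons, pvG_cons, ih]

theorem pv_getD_map (ls : List Int) (value : Int) (i : Nat) (h : i < ls.length) :
    (ls.map (fun x => decide (x < value))).getD i false = decide (ls.getD i 0 < value) := by
  simp [h]

theorem single_find_eq (ls : List Int) (value : Int) :
    single_find ls value = single_find_alt ls value := by
  cases ls with
  | nil => rfl
  | cons a t =>
    have hf : (a :: t).foldl
        (fun (st : List Nat × Option Bool × Nat) x =>
          let b := decide (x < value)
          if st.2.1 == some b then (st.1, st.2.1, st.2.2 + 1)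
          else ((if st.2.2 ≠ 0 then st.1 ++ [st.2.2] else st.1), some b, 1))
        ([], none, 0)
        = ((a :: t).map (fun x => decide (x < value))).foldl pvStep ([], none, 0) := by
      rw [List.foldl_map]
      rfl
    have hB : single_find_alt (a :: t) value
        = pvG ((a :: t).map (fun x => decide (x < value))) := by
      simp only [single_find_alt]
      rw [hf]
      simp only [List.map_cons, List.foldl_cons]
      have h0 : pvStep ([], none, 0) (decide (a < value))
          = ([], some (decide (a < value)), 1) := by
        simp [pvStep]
      rw [h0,
        pv_fold1 (t.map (fun x => decide (x < value))) [] (decide (a < value)) 1 (by omega),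
        pv_foldB2]
      simp [pvG]
    rw [hB, ← pvFG]
    show (List.range ((a :: t).length - 1)).foldl _ [] = _
    rw [pv_foldA (fun i => (a :: t).getD i 0 < value ∧ (a :: t).getD (i + 1) 0 ≥ value)
        (fun i => (a :: t).getD i 0 ≥ value ∧ (a :: t).getD (i + 1) 0 < value)]
    simp only [List.nil_append, pvF, List.length_map]
    apply List.filterMap_congr
    intro i hi
    have hlen : i < (a :: t).length - 1 := List.mem_range.mp hi
    have hi0 : i < (a :: t).length := by omega
    have hi1 : i + 1 < (a :: t).length := by omega
    rw [pv_getD_map _ _ _ hi0, pv_getD_map _ _ _ hi1]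
    set x := (a :: t).getD i 0 with hx
    set y := (a :: t).getD (i + 1) 0 with hy
    by_cases h1 : x < value <;> by_cases h2 : y < value <;>
      simp [h1, h2]

-- ===== VERDICT (by name: the statement is the Claim_ definition above) =====
theorem single_find_spec : Claim_equal_single_find := by
  intro ls value _
  unfold Spec_single_find
  exact single_find_eq ls value
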